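-- pv_equiv track=rewrite | github.com/PolskaLoli/pp1 | 04-Subroutines/py36.py | f
-- ===== SOURCE A (Python) =====
-- def f(detector):
--     osoby=0
--     for x in detector:
--         if x=="+":
--             osoby+=1
--         else:
--             osoby-=1
--     if osoby<0:
--         return f"Debilu jak z pomieszczenia może wyjść osoba która nie weszła"
--     return f"ilość osób {osoby}"
-- ===== SOURCE B (Python) =====
-- def f(detector):
--     # Cancellation stack: opposite-sign entries annihilate; the stack stays
--     # homogeneous, so at the end its first element gives the sign and its
--     # length the net head-count.
--     stack = []
--     for x in detector:
--         s = 1 if x == "+" else -1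
--         if stack and stack[-1] != s:
--             stack.pop()
--         else:
--             stack.append(s)
--     if stack and stack[0] < 0:
--         return f"Debilu jak z pomieszczenia może wyjść osoba która nie weszła"
--     return f"ilość osób {len(stack)}"
-- ===== Notes on version B (the rewrite author's own statement) =====
-- stated objective: alternative
-- what changed: Replaces A's signed counter with a cancellation stack (as in parenthesis matching): each character pops an opposite-sign top or pushes its own sign, so the final homogeneous stack yields the sign from its first element and the head-count from its length.
import Mathlib
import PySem

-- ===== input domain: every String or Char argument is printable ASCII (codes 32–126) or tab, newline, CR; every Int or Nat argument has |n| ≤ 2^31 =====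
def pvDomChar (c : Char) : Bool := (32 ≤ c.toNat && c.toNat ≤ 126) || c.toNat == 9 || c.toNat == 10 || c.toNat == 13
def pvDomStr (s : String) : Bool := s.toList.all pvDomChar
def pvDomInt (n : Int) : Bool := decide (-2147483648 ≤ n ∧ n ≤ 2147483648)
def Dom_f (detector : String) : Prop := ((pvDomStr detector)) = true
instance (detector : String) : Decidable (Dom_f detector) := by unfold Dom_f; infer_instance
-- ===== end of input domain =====

-- B replaces A's signed counter with a cancellation stack (parenthesis-matching style): opposite-sign entries annihilate, the homogeneous stack left at the end gives the sign (first element) and the count (length); an alternative algorithm of the same cost.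


-- ===== PORT A =====
-- osoby starts at 0; each char: '+' → +1, else → -1; then branch on osoby < 0
def f (detector : String) : String :=
  let osoby : Int :=
    detector.toList.foldl (fun acc x => if x == '+' then acc + 1 else acc - 1) 0
  if osoby < 0 then
    "Debilu jak z pomieszczenia może wyjść osoba która nie weszła"
  else
    "ilość osób " ++ PySem.Int.toStr osoby

-- ===== PORT B =====
-- one step of Source B's loop body: pop an opposite-sign top (stack[-1] ≠ s), else push s
def fAltStep (st : List Int) (x : Char) : List Int :=
  let s : Int := if x == '+' then 1 else -1
  match st.getLast? with
  | some t => if t ≠ s then st.dropLast else st ++ [s]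
  | none => st ++ [s]

def f_alt (detector : String) : String :=
  let stack : List Int := detector.toList.foldl fAltStep []
  if stack ≠ [] ∧ stack.headD 0 < 0 then
    "Debilu jak z pomieszczenia może wyjść osoba która nie weszła"
  else
    "ilość osób " ++ PySem.Int.toStr (stack.length : Int)

-- ===== PRECONDITION & SPEC =====
def Spec_f (detector : String) (out : String) : Prop := out = f_alt detector
instance (detector : String) (out : String) : Decidable (Spec_f detector out) := by unfold Spec_f; infer_instance

-- ===== CLAIM (what is proved, stated in full; the proofs are below) =====
def Claim_equal_f : Prop := ∀ (detector : String), Dom_f detector → Spec_f detector (f detector)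

-- ===== LEMMAS AND PROOFS =====

-- the abstraction: a net count n is represented by a homogeneous stack of |n| copies of its sign
def encodeStack (n : Int) : List Int :=
  if 0 ≤ n then List.replicate n.toNat 1 else List.replicate (-n).toNat (-1)

theorem getLast?_replicate_succ (k : Nat) (a : Int) :
    (List.replicate (k + 1) a).getLast? = some a := by
  rw [List.replicate_succ', List.getLast?_append]; simp

theorem dropLast_replicate_succ (k : Nat) (a : Int) :
    (List.replicate (k + 1) a).dropLast = List.replicate k a := by
  rw [List.replicate_succ']; exact List.dropLast_concat

theorem step_encode (n : Int) (x : Char) :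
    fAltStep (encodeStack n) x = encodeStack (if x == '+' then n + 1 else n - 1) := by
  rcases lt_trichotomy n 0 with h | h | h
  · obtain ⟨k, hk⟩ : ∃ k, (-n).toNat = k + 1 := ⟨(-n).toNat - 1, by omega⟩
    have he : encodeStack n = List.replicate (k + 1) (-1) := by
      rw [encodeStack, if_neg (by omega : ¬ (0:Int) ≤ n), hk]
    cases hx : (x == '+') with
    | true =>
      simp only [fAltStep, hx, if_true, he, getLast?_replicate_succ]
      rw [if_pos (by decide : (-1 : Int) ≠ 1), dropLast_replicate_succ, encodeStack]
      by_cases h2 : 0 ≤ n + 1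
      · rw [if_pos h2]
        simp [show k = 0 by omega, show (n + 1).toNat = 0 by omega]
      · rw [if_neg h2]; congr 1; omega
    | false =>
      simp only [fAltStep, hx, Bool.false_eq_true, if_false, he, getLast?_replicate_succ]
      rw [if_neg (by decide : ¬ ((-1 : Int) ≠ -1)), ← List.replicate_succ']
      rw [encodeStack, if_neg (by omega : ¬ (0:Int) ≤ n - 1)]
      congr 1; omega
  · subst h
    cases hx : (x == '+') <;>
      simp [fAltStep, encodeStack, hx]
  · obtain ⟨k, hk⟩ : ∃ k, n.toNat = k + 1 := ⟨n.toNat - 1, by omega⟩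
    have he : encodeStack n = List.replicate (k + 1) 1 := by
      rw [encodeStack, if_pos (by omega : (0:Int) ≤ n), hk]
    cases hx : (x == '+') with
    | true =>
      simp only [fAltStep, hx, if_true, he, getLast?_replicate_succ]
      rw [if_neg (by decide : ¬ ((1 : Int) ≠ 1)), ← List.replicate_succ']
      rw [encodeStack, if_pos (by omega : (0:Int) ≤ n + 1)]
      congr 1; omega
    | false =>
      simp only [fAltStep, hx, Bool.false_eq_true, if_false, he, getLast?_replicate_succ]
      rw [if_pos (by decide : (1 : Int) ≠ -1), dropLast_replicate_succ]
      rw [encodeStack, if_pos (by omega : (0:Int) ≤ n - 1)]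
      congr 1; omega

theorem foldl_encode (cs : List Char) (n : Int) :
    cs.foldl fAltStep (encodeStack n)
      = encodeStack (cs.foldl (fun acc x => if x == '+' then acc + 1 else acc - 1) n) := by
  induction cs generalizing n with
  | nil => rfl
  | cons hd t ih => simp only [List.foldl_cons, step_encode]; exact ih _

-- ===== VERDICT (by name: the statement is the Claim_ definition above) =====
theorem f_spec : Claim_equal_f := by
  intro detector _
  unfold Spec_f f f_alt
  set n : Int := detector.toList.foldl (fun acc x => if x == '+' then acc + 1 else acc - 1) 0 with hn
  have hfold : detector.toList.foldl fAltStep [] = encodeStack n := by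
    have h0 : ([] : List Int) = encodeStack 0 := by simp [encodeStack]
    rw [h0, foldl_encode, ← hn]
  simp only [hfold]
  by_cases h : n < 0
  · have hne : encodeStack n ≠ [] := by
      simp only [encodeStack, if_neg (by omega : ¬ (0:Int) ≤ n)]
      simp
      omega
    have hhd : (encodeStack n).headD 0 = -1 := by
      have ht : (-n).toNat = ((-n).toNat - 1) + 1 := by omega
      rw [encodeStack, if_neg (by omega : ¬ (0:Int) ≤ n), ht, List.replicate_succ]
      simp
    rw [if_pos h, if_pos ⟨hne, by rw [hhd]; decide⟩]
  · have hnb : ¬ ((encodeStack n ≠ []) ∧ (encodeStack n).headD 0 < 0) := by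
      rcases Nat.eq_zero_or_pos n.toNat with h2 | h2
      · intro ⟨hne, _⟩
        exact hne (by simp [encodeStack, if_pos (by omega : (0:Int) ≤ n), h2])
      · intro ⟨_, hlt⟩
        have ht : n.toNat = (n.toNat - 1) + 1 := by omega
        rw [encodeStack, if_pos (by omega : (0:Int) ≤ n), ht, List.replicate_succ] at hlt
        simp at hlt
    rw [if_neg h, if_neg hnb]
    congr 2
    simp only [encodeStack, if_pos (by omega : (0:Int) ≤ n), List.length_replicate]
    omega
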